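-- pv_equiv track=rewrite | github.com/ankitshah009/leetcode_python | graphs/1183-maximum_number_of_ones.py | maximumNumberOfOnes
-- ===== SOURCE A (Python) =====
-- def maximumNumberOfOnes(width: int, height: int, sideLength: int, maxOnes: int) -> int:
--     """Direct calculation"""
--     s = sideLength
--
--     # Full tiles in each dimension
--     full_h = height // s
--     full_w = width // s
--
--     # Remaining rows and cols
--     rem_h = height % s
--     rem_w = width % s
--
--     # Count appearances of each position in tile
--     counts = []
--
--     for r in range(s):
--         for c in range(s):
--             # Base count from full tiles
--             count = full_h * full_w
--
--             # Add from partial row at bottom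
--             if r < rem_h:
--                 count += full_w
--
--             # Add from partial column at right
--             if c < rem_w:
--                 count += full_h
--
--             # Add corner if in both partial regions
--             if r < rem_h and c < rem_w:
--                 count += 1
--
--             counts.append(count)
--
--     counts.sort(reverse=True)
--     return sum(counts[:maxOnes])
-- ===== SOURCE B (Python) =====
-- def maximumNumberOfOnes(width: int, height: int, sideLength: int, maxOnes: int) -> int:
--     """O(1): each of the sideLength*sideLength tile positions falls into one of
--     four value classes determined by whether its row/col index lies in the
--     partial strip; greedily take the maxOnes highest-valued cells."""
--     s = sideLength
--     fh, fw = height // s, width // s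
--     rh, rw = height % s, width % s
--     base = fh * fw
--     buckets = [
--         (base + fw + fh + 1, rh * rw),
--         (base + fw, rh * (s - rw)),
--         (base + fh, (s - rh) * rw),
--         (base, (s - rh) * (s - rw)),
--     ]
--     buckets.sort(key=lambda p: p[0], reverse=True)
--     total = 0
--     k = maxOnes
--     for value, mult in buckets:
--         take = min(k, mult)
--         total += value * take
--         k -= take
--     return total
-- ===== Notes on version B (the rewrite author's own statement) =====
-- stated objective: faster
-- what changed: Instead of materialising all sideLength^2 per-position counts, sorting them and summing a prefix, B forms the 4 value classes (partial-row/partial-column indicator combinations) with their multiplicities in closed form and greedily takes the maxOnes highest-valued cells.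
-- outside the precondition, e.g. on maximumNumberOfOnes(3, 3, -2, 2): A returns 0, B returns 6; on maximumNumberOfOnes(3, 3, 2, -1): A returns 8, B returns -4
import Mathlib
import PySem

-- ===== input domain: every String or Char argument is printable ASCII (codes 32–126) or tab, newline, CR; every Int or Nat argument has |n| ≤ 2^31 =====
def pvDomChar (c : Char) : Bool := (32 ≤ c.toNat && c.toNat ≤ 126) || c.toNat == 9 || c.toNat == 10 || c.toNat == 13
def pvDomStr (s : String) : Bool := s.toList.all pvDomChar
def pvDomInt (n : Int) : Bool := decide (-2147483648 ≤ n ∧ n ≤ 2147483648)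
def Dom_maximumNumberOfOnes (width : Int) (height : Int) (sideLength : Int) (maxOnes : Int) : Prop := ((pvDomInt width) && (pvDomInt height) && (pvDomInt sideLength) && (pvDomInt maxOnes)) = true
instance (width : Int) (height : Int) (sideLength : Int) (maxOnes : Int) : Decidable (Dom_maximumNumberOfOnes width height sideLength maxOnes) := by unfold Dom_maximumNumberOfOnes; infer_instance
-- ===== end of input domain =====

-- B replaces A's build-sort-slice over sideLength^2 per-position counts by the 4 closed-form
-- value classes with multiplicities and a greedy take of the maxOnes highest cells (faster: O(1) vs O(s^2 log s)).

-- ===== PORT A =====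
def maximumNumberOfOnes (width : Int) (height : Int) (sideLength : Int) (maxOnes : Int) : Int :=
  let s := sideLength
  let full_h := PySem.Int.floordiv height s
  let full_w := PySem.Int.floordiv width s
  let rem_h := PySem.Int.mod height s
  let rem_w := PySem.Int.mod width s
  let counts : List Int :=
    (PySem.List.pyRange 0 s 1).foldl (fun acc r =>
      (PySem.List.pyRange 0 s 1).foldl (fun acc c =>
        let count := full_h * full_w
        let count := if r < rem_h then count + full_w else count
        let count := if c < rem_w then count + full_h else count
        let count := if r < rem_h ∧ c < rem_w then count + 1 else count
        acc ++ [count]) acc) []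
  -- counts.sort(reverse=True) on plain ints: ported as a descending merge sort (exact: the
  -- descending-sorted int list is unique given the multiset; PySem's insertion sort is the same
  -- list but overflows the interpreter stack on admitted input sizes)
  let counts := counts.mergeSort (fun a b => decide (b ≤ a))
  (PySem.List.slice counts none (some maxOnes)).sum

-- ===== PORT B =====
def maximumNumberOfOnes_alt (width : Int) (height : Int) (sideLength : Int) (maxOnes : Int) : Int :=
  let s := sideLength
  let fh := PySem.Int.floordiv height s
  let fw := PySem.Int.floordiv width s
  let rh := PySem.Int.mod height s
  let rw := PySem.Int.mod width s
  let base := fh * fw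
  let buckets : List (Int × Int) :=
    [(base + fw + fh + 1, rh * rw), (base + fw, rh * (s - rw)),
     (base + fh, (s - rh) * rw), (base, (s - rh) * (s - rw))]
  let buckets := PySem.List.sorted buckets (fun p => p.1) true
  let res := buckets.foldl (fun tk p =>
    let take := min tk.2 p.2
    (tk.1 + p.1 * take, tk.2 - take)) ((0 : Int), maxOnes)
  res.1

-- ===== PRECONDITION & SPEC =====
-- Pre_ restricts to the problem's natural domain (1 ≤ sideLength, 0 ≤ maxOnes): sideLength = 0 makes
-- A raise ZeroDivisionError, and A's values on sideLength < 0 (empty range() grid) and on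
-- maxOnes < 0 (Python's negative-slice wraparound in counts[:maxOnes]) are implementation accidents
-- on degenerate inputs no caller would specify.
def Pre_maximumNumberOfOnes (width : Int) (height : Int) (sideLength : Int) (maxOnes : Int) : Prop :=
  1 ≤ sideLength ∧ 0 ≤ maxOnes
instance (width : Int) (height : Int) (sideLength : Int) (maxOnes : Int) : Decidable (Pre_maximumNumberOfOnes width height sideLength maxOnes) := by unfold Pre_maximumNumberOfOnes; infer_instance

def pvWitness_maximumNumberOfOnes : Int × Int × Int × Int := (5, 4, 3, 2)

def Spec_maximumNumberOfOnes (width : Int) (height : Int) (sideLength : Int) (maxOnes : Int) (out : Int) : Prop := out = maximumNumberOfOnes_alt width height sideLength maxOnes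
instance (width : Int) (height : Int) (sideLength : Int) (maxOnes : Int) (out : Int) : Decidable (Spec_maximumNumberOfOnes width height sideLength maxOnes out) := by unfold Spec_maximumNumberOfOnes; infer_instance

-- ===== CLAIM (what is proved, stated in full; the proofs are below) =====
def Claim_equal_maximumNumberOfOnes : Prop := ∀ (width : Int) (height : Int) (sideLength : Int) (maxOnes : Int), Dom_maximumNumberOfOnes width height sideLength maxOnes → Pre_maximumNumberOfOnes width height sideLength maxOnes → Spec_maximumNumberOfOnes width height sideLength maxOnes (maximumNumberOfOnes width height sideLength maxOnes)

-- ===== LEMMAS AND PROOFS =====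

/-- Expansion of a (value, multiplicity) class list into the multiset of cell values it describes. -/
def pvExpand (ps : List (Int × Int)) : List Int :=
  ps.flatMap (fun p => List.replicate p.2.toNat p.1)

/-- B's greedy fold over class pairs computes the sum of the first k values of the expansion. -/
lemma pvGreedy_sum (ps : List (Int × Int)) (hm : ∀ p ∈ ps, 0 ≤ p.2) :
    ∀ (t k : Int), 0 ≤ k →
    (ps.foldl (fun tk p =>
        let take := min tk.2 p.2
        (tk.1 + p.1 * take, tk.2 - take)) (t, k)).1
      = t + ((pvExpand ps).take k.toNat).sum := by
  induction ps with
  | nil => intro t k hk; simp [pvExpand]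
  | cons p rest ih =>
    intro t k hk
    have hmp : 0 ≤ p.2 := hm p (by simp)
    have hrest : ∀ q ∈ rest, 0 ≤ q.2 := fun q hq => hm q (by simp [hq])
    have hk' : 0 ≤ k - min k p.2 := by omega
    simp only [List.foldl_cons]
    rw [ih hrest _ _ hk']
    have hexp : pvExpand (p :: rest) = List.replicate p.2.toNat p.1 ++ pvExpand rest := by
      simp [pvExpand]
    rw [hexp, List.take_append, List.take_replicate, List.sum_append, List.sum_replicate_int]
    simp only [List.length_replicate]
    have h1 : ((min k.toNat p.2.toNat : Nat) : Int) = min k p.2 := by omega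
    have h2 : (k - min k p.2).toNat = k.toNat - p.2.toNat := by omega
    rw [h1, h2]
    ring

/-- Expanding a class list whose values are non-increasing yields a non-increasing value list. -/
lemma pvExpand_pairwise (ps : List (Int × Int)) (h : ps.Pairwise (fun p q => q.1 ≤ p.1)) :
    (pvExpand ps).Pairwise (fun a b : Int => b ≤ a) := by
  induction ps with
  | nil => simp [pvExpand]
  | cons p rest ih =>
    have hexp : pvExpand (p :: rest) = List.replicate p.2.toNat p.1 ++ pvExpand rest := by
      simp [pvExpand]
    rw [hexp]
    rcases List.pairwise_cons.mp h with ⟨hhead, htail⟩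
    refine List.pairwise_append.mpr ⟨List.pairwise_replicate.mpr (Or.inr le_rfl), ih htail, ?_⟩
    intro a ha b hb
    have ha' : a = p.1 := List.eq_of_mem_replicate ha
    rcases List.mem_flatMap.mp hb with ⟨q, hq, hbq⟩
    have hb' : b = q.1 := List.eq_of_mem_replicate hbq
    rw [ha', hb']; exact hhead q hq

/-- A's nested append-singleton loops are a flatMap of row maps. -/
lemma pvNested_foldl (outer inner : List Int) (f : Int → Int → Int) :
    outer.foldl (fun acc r => inner.foldl (fun acc c => acc ++ [f r c]) acc) []
      = outer.flatMap (fun r => inner.map (fun c => f r c)) := by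
  have hfun : (fun (acc : List Int) (r : Int) =>
      inner.foldl (fun acc c => acc ++ [f r c]) acc)
      = (fun acc r => acc ++ inner.map (fun c => f r c)) := by
    funext acc r
    exact PySem.List.foldl_append_singleton_eq_map _ _ acc
  rw [hfun, PySem.List.foldl_append_eq_flatMap]
  simp

/-- A map of a threshold test over range(s) is two blocks of constants. -/
lemma pvRow_eq (s rw vT vF : Int) (hrw0 : 0 ≤ rw) (hrw : rw ≤ s) :
    (PySem.List.pyRange 0 s 1).map (fun c => if c < rw then vT else vF)
      = List.replicate rw.toNat vT ++ List.replicate (s - rw).toNat vF := by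
  rw [PySem.List.pyRange_one_append 0 rw s hrw0 hrw, List.map_append]
  have h1 : (PySem.List.pyRange 0 rw 1).map (fun c => if c < rw then vT else vF)
      = (PySem.List.pyRange 0 rw 1).map (fun _ => vT) := by
    apply List.map_congr_left
    intro c hc
    rcases (PySem.List.mem_pyRange_one).mp hc with ⟨_, hlt⟩
    simp [hlt]
  have h2 : (PySem.List.pyRange rw s 1).map (fun c => if c < rw then vT else vF)
      = (PySem.List.pyRange rw s 1).map (fun _ => vF) := by
    apply List.map_congr_left
    intro c hc
    rcases (PySem.List.mem_pyRange_one).mp hc with ⟨hge, _⟩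
    simp [not_lt.mpr hge]
  rw [h1, h2, List.map_const', List.map_const',
    PySem.List.length_pyRange_one, PySem.List.length_pyRange_one]
  norm_num

/-- flatMap of a constant row is a flattened replicate. -/
lemma pvFlatMap_const (l : List Int) (L : List Int) :
    l.flatMap (fun _ => L) = (List.replicate l.length L).flatten := by
  simp [List.flatMap]

/-- Flatten distributes over an appended pair, up to permutation. -/
lemma pvFlatten_replicate_append_perm (n : Nat) (x y : List Int) :
    (List.replicate n (x ++ y)).flatten.Perm
      ((List.replicate n x).flatten ++ (List.replicate n y).flatten) := by
  induction n with
  | zero => simp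
  | succ m ih =>
    simp only [List.replicate_succ, List.flatten_cons]
    refine ((ih.append_left (x ++ y)).trans ?_)
    rw [List.append_assoc, List.append_assoc]
    exact (List.perm_append_comm_assoc y (List.replicate m x).flatten
      (List.replicate m y).flatten).append_left x

/-- The grid of per-position counts is, up to permutation, the expansion of the four classes. -/
lemma pvCounts_perm (s rh rw v11 v10 v01 v00 : Int)
    (hrh0 : 0 ≤ rh) (hrh : rh ≤ s) (hrw0 : 0 ≤ rw) (hrw : rw ≤ s)
    (g : Int → Int → Int)
    (hg : ∀ r c, g r c = if r < rh then (if c < rw then v11 else v10)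
                         else (if c < rw then v01 else v00)) :
    ((PySem.List.pyRange 0 s 1).flatMap
        (fun r => (PySem.List.pyRange 0 s 1).map (fun c => g r c))).Perm
      (pvExpand [(v11, rh * rw), (v10, rh * (s - rw)),
                 (v01, (s - rh) * rw), (v00, (s - rh) * (s - rw))]) := by
  have hrowT : ∀ r : Int, r < rh →
      (PySem.List.pyRange 0 s 1).map (fun c => g r c)
        = List.replicate rw.toNat v11 ++ List.replicate (s - rw).toNat v10 := by
    intro r hr
    rw [← pvRow_eq s rw v11 v10 hrw0 hrw]
    apply List.map_congr_left
    intro c _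
    rw [hg, if_pos hr]
  have hrowF : ∀ r : Int, rh ≤ r →
      (PySem.List.pyRange 0 s 1).map (fun c => g r c)
        = List.replicate rw.toNat v01 ++ List.replicate (s - rw).toNat v00 := by
    intro r hr
    rw [← pvRow_eq s rw v01 v00 hrw0 hrw]
    apply List.map_congr_left
    intro c _
    rw [hg, if_neg (not_lt.mpr hr)]
  have hsplit := PySem.List.pyRange_one_append 0 rh s hrh0 hrh
  nth_rewrite 2 [hsplit]
  rw [List.flatMap_append]
  have hT : (PySem.List.pyRange 0 rh 1).flatMap
      (fun r => (PySem.List.pyRange 0 s 1).map (fun c => g r c))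
      = (PySem.List.pyRange 0 rh 1).flatMap
          (fun _ => List.replicate rw.toNat v11 ++ List.replicate (s - rw).toNat v10) := by
    apply List.flatMap_congr
    intro r hr
    rcases (PySem.List.mem_pyRange_one).mp hr with ⟨_, hlt⟩
    exact hrowT r hlt
  have hF : (PySem.List.pyRange rh s 1).flatMap
      (fun r => (PySem.List.pyRange 0 s 1).map (fun c => g r c))
      = (PySem.List.pyRange rh s 1).flatMap
          (fun _ => List.replicate rw.toNat v01 ++ List.replicate (s - rw).toNat v00) := by
    apply List.flatMap_congr
    intro r hr
    rcases (PySem.List.mem_pyRange_one).mp hr with ⟨hge, _⟩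
    exact hrowF r hge
  rw [hT, hF, pvFlatMap_const, pvFlatMap_const,
    PySem.List.length_pyRange_one, PySem.List.length_pyRange_one]
  simp only [sub_zero]
  have key : ∀ (n bn cn : Nat) (vA vB : Int),
      (List.replicate n (List.replicate bn vA ++ List.replicate cn vB)).flatten.Perm
        (List.replicate (n * bn) vA ++ List.replicate (n * cn) vB) := by
    intro n bn cn vA vB
    refine (pvFlatten_replicate_append_perm n _ _).trans ?_
    rw [List.flatten_replicate_replicate, List.flatten_replicate_replicate]
  have hexp : pvExpand [(v11, rh * rw), (v10, rh * (s - rw)),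
                 (v01, (s - rh) * rw), (v00, (s - rh) * (s - rw))]
      = List.replicate (rh.toNat * rw.toNat) v11
        ++ List.replicate (rh.toNat * (s - rw).toNat) v10
        ++ (List.replicate ((s - rh).toNat * rw.toNat) v01
            ++ List.replicate ((s - rh).toNat * (s - rw).toNat) v00) := by
    simp only [pvExpand, List.flatMap_cons, List.flatMap_nil, List.append_nil]
    rw [Int.toNat_mul hrh0 hrw0, Int.toNat_mul hrh0 (by omega : (0:Int) ≤ s - rw),
      Int.toNat_mul (by omega : (0:Int) ≤ s - rh) hrw0,
      Int.toNat_mul (by omega : (0:Int) ≤ s - rh) (by omega : (0:Int) ≤ s - rw),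
      List.append_assoc]
  rw [hexp]
  exact (key _ _ _ _ _).append (key _ _ _ _ _)

/-- Uniqueness of the descending sort: any non-increasing rearrangement is the descending merge sort. -/
lemma pvSorted_rev_unique (xs ys : List Int) (h : ys.Perm xs)
    (hp : ys.Pairwise (fun a b => b ≤ a)) :
    xs.mergeSort (fun a b => decide (b ≤ a)) = ys := by
  have hs : (xs.mergeSort (fun a b => decide (b ≤ a))).Pairwise (fun a b : Int => b ≤ a) := by
    have := List.pairwise_mergeSort (le := fun a b : Int => decide (b ≤ a))
      (by intro a b c h1 h2; simp at *; omega) (by intro a b; simp; omega) xs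
    exact this.imp (by intro a b hab; simpa using hab)
  exact ((List.mergeSort_perm xs _).trans h.symm).eq_of_pairwise
    (fun a b _ _ h1 h2 => by omega) hs hp

/-- Core equivalence, with the per-cell count function abstract. -/
lemma pvMain (s k rh rw v11 v10 v01 v00 : Int) (g : Int → Int → Int)
    (hk : 0 ≤ k) (hrh0 : 0 ≤ rh) (hrh1 : rh ≤ s) (hrw0 : 0 ≤ rw) (hrw1 : rw ≤ s)
    (hg : ∀ r c, g r c = if r < rh then (if c < rw then v11 else v10)
                         else (if c < rw then v01 else v00)) :
    (PySem.List.slice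
        (((PySem.List.pyRange 0 s 1).foldl (fun acc r =>
          (PySem.List.pyRange 0 s 1).foldl (fun acc c => acc ++ [g r c]) acc) []).mergeSort
          (fun a b => decide (b ≤ a))) none (some k)).sum
    = ((PySem.List.sorted [(v11, rh * rw), (v10, rh * (s - rw)),
          (v01, (s - rh) * rw), (v00, (s - rh) * (s - rw))] (fun p => p.1) true).foldl
        (fun tk p =>
          let take := min tk.2 p.2
          (tk.1 + p.1 * take, tk.2 - take)) ((0 : Int), k)).1 := by
  set buckets : List (Int × Int) := [(v11, rh * rw), (v10, rh * (s - rw)),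
      (v01, (s - rh) * rw), (v00, (s - rh) * (s - rw))] with hbuckets
  set sb := PySem.List.sorted buckets (fun p => p.1) true with hsb
  rw [pvNested_foldl]
  have hperm := pvCounts_perm s rh rw v11 v10 v01 v00 hrh0 hrh1 hrw0 hrw1 g hg
  have hsbperm : (pvExpand sb).Perm (pvExpand buckets) :=
    List.Perm.flatMap_right _ (PySem.List.sorted_perm buckets _ true)
  have hsbpair : (pvExpand sb).Pairwise (fun a b : Int => b ≤ a) :=
    pvExpand_pairwise sb (PySem.List.sorted_pairwise_rev buckets (fun p => p.1))
  have hmul : ∀ p ∈ sb, 0 ≤ p.2 := by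
    intro p hp
    have hpb : p ∈ buckets := (PySem.List.mem_sorted _ _ _ _).mp hp
    have h1 : (0:Int) ≤ rh * rw := mul_nonneg hrh0 hrw0
    have h2 : (0:Int) ≤ rh * (s - rw) := mul_nonneg hrh0 (by omega)
    have h3 : (0:Int) ≤ (s - rh) * rw := mul_nonneg (by omega) hrw0
    have h4 : (0:Int) ≤ (s - rh) * (s - rw) := mul_nonneg (by omega) (by omega)
    simp only [hbuckets, List.mem_cons, List.not_mem_nil, or_false] at hpb
    rcases hpb with h | h | h | h <;> (rw [h]; assumption)
  rw [pvSorted_rev_unique _ (pvExpand sb) (hsbperm.trans hperm.symm) hsbpair,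
    PySem.List.slice_to _ hk, pvGreedy_sum sb hmul 0 k hk]
  simp

-- ===== VERDICT (by name: the statement is the Claim_ definition above) =====
theorem maximumNumberOfOnes_spec : Claim_equal_maximumNumberOfOnes := by
  intro width height s maxOnes _ hpre
  obtain ⟨hs, hk⟩ := hpre
  have hs0 : (0:Int) < s := by omega
  unfold Spec_maximumNumberOfOnes maximumNumberOfOnes maximumNumberOfOnes_alt
  exact pvMain s maxOnes (PySem.Int.mod height s) (PySem.Int.mod width s)
    (PySem.Int.floordiv height s * PySem.Int.floordiv width s
      + PySem.Int.floordiv width s + PySem.Int.floordiv height s + 1)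
    (PySem.Int.floordiv height s * PySem.Int.floordiv width s + PySem.Int.floordiv width s)
    (PySem.Int.floordiv height s * PySem.Int.floordiv width s + PySem.Int.floordiv height s)
    (PySem.Int.floordiv height s * PySem.Int.floordiv width s)
    (fun r c =>
      let count := PySem.Int.floordiv height s * PySem.Int.floordiv width s
      let count := if r < PySem.Int.mod height s then count + PySem.Int.floordiv width s else count
      let count := if c < PySem.Int.mod width s then count + PySem.Int.floordiv height s else count
      if r < PySem.Int.mod height s ∧ c < PySem.Int.mod width s then count + 1 else count)
    hk (PySem.Int.mod_nonneg height hs0) (le_of_lt (PySem.Int.mod_lt height hs0))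
    (PySem.Int.mod_nonneg width hs0) (le_of_lt (PySem.Int.mod_lt width hs0))
    (by
      intro r c
      dsimp only
      split_ifs with h1 h2 h3 h4 h5 h6 h7
      all_goals try ring
      all_goals exfalso
      all_goals omega)
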